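-- pv_equiv track=rewrite | github.com/abbasmoosajee07/EverybodyCodes | Stories/Melody/02/MelodyQuest02.py | surround_sound_waves
-- ===== SOURCE A (Python) =====
-- MOVES_ORDER = [(-1, 0), (0, 1), (1, 0), (0, -1)]  # ^>v<
--
-- def all_adjs(p):
--     r, c = p
--     return [(r - 1, c), (r, c + 1), (r + 1, c), (r, c - 1)]
--
-- def get_next(pos, step_index):
--     r, c = pos
--     dr, dc = MOVES_ORDER[step_index % 4]
--     return (r + dr, c + dc)
--
-- def is_enclosed(p, seen):
--     return not (set(all_adjs(p)) - seen)
--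
-- def block_enclosed(p, seen):
--     for a in all_adjs(p):
--         if a not in seen and is_enclosed(a, seen):
--             seen.add(a)
--             block_enclosed(a, seen)
--
-- def surround_sound_waves(grid, start):
--     obstacles = [pos for pos, cell in grid.items() if cell == "#"]
--     seen = {start, *obstacles}
--     goal = {a for obs in obstacles for a in all_adjs(obs)}
--
--     pos = start
--     step_index = 0
--     num_steps = 0
--     fails = 0
--
--     while goal - seen:
--         new = get_next(pos, step_index)
--         step_index += 1
--         if new not in seen:
--             fails = 0
--             pos = new
--             num_steps += 1
--             seen.add(pos)
--             block_enclosed(pos, seen)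
--         else:
--             fails += 1
--             if fails > 10:
--                 break  # truly stuck
--
--     return num_steps
-- ===== SOURCE B (Python) =====
-- def surround_sound_waves(grid, start):
--     obstacles = [pos for pos, cell in grid.items() if cell == "#"]
--     seen = {start, *obstacles}
--     goal = {a for obs in obstacles for a in all_adjs_b(obs)}
--
--     pos = start
--     dr, dc = (-1, 0)
--     num_steps = 0
--     fails = 0
--
--     while any(g not in seen for g in goal):
--         new = (pos[0] + dr, pos[1] + dc)
--         dr, dc = dc, -dr  # rotate ^ > v < cyclically
--         if new not in seen:
--             fails = 0
--             pos = new
--             num_steps += 1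
--             seen.add(pos)
--             # iterative enclosure flood: worklist of cells to examine
--             work = all_adjs_b(pos)
--             while work:
--                 a = work[0]
--                 work = work[1:]
--                 if a not in seen and all(n in seen for n in all_adjs_b(a)):
--                     seen.add(a)
--                     work = all_adjs_b(a) + work
--         else:
--             fails += 1
--             if fails > 10:
--                 break  # truly stuck
--
--     return num_steps
--
-- def all_adjs_b(p):
--     r, c = p
--     return [(r - 1, c), (r, c + 1), (r + 1, c), (r, c - 1)]
-- ===== Notes on version B (the rewrite author's own statement) =====
-- stated objective: idiomatic
-- what changed: The recursive flood fill block_enclosed is replaced by an explicit iterative worklist loop, the MOVES_ORDER table with step_index % 4 lookup by a direction vector rotated in place each step, and the goal - seen set-difference loop test by an any() membership scan.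
import Mathlib
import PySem

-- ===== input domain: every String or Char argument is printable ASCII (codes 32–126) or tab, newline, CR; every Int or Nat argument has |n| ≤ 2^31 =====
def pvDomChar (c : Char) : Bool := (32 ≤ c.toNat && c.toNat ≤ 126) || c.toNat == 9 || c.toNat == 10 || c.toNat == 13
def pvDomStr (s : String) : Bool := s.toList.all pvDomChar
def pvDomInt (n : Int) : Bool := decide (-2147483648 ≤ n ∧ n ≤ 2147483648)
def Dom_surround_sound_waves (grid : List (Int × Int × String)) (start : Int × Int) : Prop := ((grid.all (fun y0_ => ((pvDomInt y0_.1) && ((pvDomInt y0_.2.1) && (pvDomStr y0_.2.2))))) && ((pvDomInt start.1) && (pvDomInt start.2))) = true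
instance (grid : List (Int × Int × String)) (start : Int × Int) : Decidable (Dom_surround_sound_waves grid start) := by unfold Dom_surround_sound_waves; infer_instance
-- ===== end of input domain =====

-- B replaces A's recursive flood fill by an explicit worklist loop and the direction
-- table + modulo lookup by in-place rotation of a direction vector (objective: idiomatic,
-- no speed claim). Python A mutates its `seen` set locally only; no caller-visible mutation.
-- Both ports use a fuel guard (2^64 outer iterations / flood examinations) solely to make
-- the loops total in Lean; the Python loops have no such bound.  The Python `seen` set is
-- consulted only through membership, so both ports model it by the same ordered set
-- (Std.TreeSet) — exact for a Python set used this way, since no result depends on its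
-- iteration order.

-- comparator for the coordinate-pair set (membership agrees with Python's ==)
def pvCmp (a b : Int × Int) : Ordering := (compare a.1 b.1).then (compare a.2 b.2)

abbrev PvSeen : Type := Std.TreeSet (Int × Int) pvCmp

-- ===== PORT A =====
-- MOVES_ORDER = [(-1,0),(0,1),(1,0),(0,-1)]
def pvA_moves : List (Int × Int) := [(-1, 0), (0, 1), (1, 0), (0, -1)]

def pvA_allAdjs (p : Int × Int) : List (Int × Int) :=
  [(p.1 - 1, p.2), (p.1, p.2 + 1), (p.1 + 1, p.2), (p.1, p.2 - 1)]

-- get_next(pos, step_index); the step counter only ever increments from 0, kept as Nat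
def pvA_getNext (pos : Int × Int) (stepIndex : Nat) : Int × Int :=
  let d := pvA_moves.getD (stepIndex % 4) (0, 0)
  (pos.1 + d.1, pos.2 + d.2)

-- is_enclosed(p, seen) = not (set(all_adjs(p)) - seen): the temporary set of the four
-- neighbours minus `seen`, tested for emptiness (difference = membership filter)
def pvA_isEnclosed (p : Int × Int) (seen : PvSeen) : Bool :=
  ((PySem.Set.ofList (pvA_allAdjs p)).filter (fun x => !seen.contains x)).isEmpty

-- block_enclosed's `for a in all_adjs(p)` loop, over the remaining adjacency list.
-- Fuel (one unit per examined cell, threaded through the recursion) only makes the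
-- recursion total; the returned bound r.2 ≤ f justifies termination.
def pvA_blockAux : (f : Nat) → PvSeen → List (Int × Int) → {r : PvSeen × Nat // r.2 ≤ f}
  | f, seen, [] => ⟨(seen, f), Nat.le_refl f⟩
  | 0, seen, _ :: _ => ⟨(seen, 0), Nat.le_refl 0⟩
  | f + 1, seen, a :: rest =>
    if !seen.contains a && pvA_isEnclosed a seen then
      match pvA_blockAux f (seen.insert a) (pvA_allAdjs a) with
      | ⟨(s1, f1), h1⟩ =>
        match pvA_blockAux f1 s1 rest with
        | ⟨(s2, f2), h2⟩ => ⟨(s2, f2), by omega⟩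
    else
      match pvA_blockAux f seen rest with
      | ⟨(s1, f1), h1⟩ => ⟨(s1, f1), by omega⟩
  termination_by f _ l => (f, l.length)
  decreasing_by
  · exact Prod.Lex.left _ _ (Nat.lt_succ_self f)
  · exact Prod.Lex.left _ _ (by omega)
  · exact Prod.Lex.left _ _ (Nat.lt_succ_self f)

-- block_enclosed(p, seen)
def pvA_blockEnclosed (fuel : Nat) (p : Int × Int) (seen : PvSeen) : PvSeen :=
  (pvA_blockAux fuel seen (pvA_allAdjs p)).val.1

-- the `while goal - seen:` loop (goal - seen = the goal cells not in seen)
def pvA_loop : Nat → PySem.Set (Int × Int) → PvSeen → (Int × Int) → Nat → Int → Int → Int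
  | 0, _, _, _, _, numSteps, _ => numSteps
  | f + 1, goal, seen, pos, stepIndex, numSteps, fails =>
    if (goal.filter (fun g => !seen.contains g)).isEmpty then numSteps
    else
      let nw := pvA_getNext pos stepIndex
      let stepIndex' := stepIndex + 1
      if !seen.contains nw then
        let seen' := seen.insert nw
        let seen'' := pvA_blockEnclosed 18446744073709551616 nw seen'
        pvA_loop f goal seen'' nw stepIndex' (numSteps + 1) 0
      else
        let fails' := fails + 1
        if fails' > 10 then numSteps
        else pvA_loop f goal seen pos stepIndex' numSteps fails'

def surround_sound_waves (grid : List (Int × Int × String)) (start : Int × Int) : Int :=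
  let d : PySem.Dict (Int × Int) String :=
    grid.foldl (fun d e => d.insert (e.1, e.2.1) e.2.2) PySem.Dict.empty
  let obstacles := (d.items.filter (fun kv => kv.2 == "#")).map (·.1)
  let seen : PvSeen := Std.TreeSet.ofList (start :: obstacles) pvCmp
  let goal : PySem.Set (Int × Int) := PySem.Set.ofList (obstacles.flatMap pvA_allAdjs)
  pvA_loop 18446744073709551616 goal seen start 0 0 0

-- ===== PORT B =====
def pvB_adjs (p : Int × Int) : List (Int × Int) :=
  [(p.1 - 1, p.2), (p.1, p.2 + 1), (p.1 + 1, p.2), (p.1, p.2 - 1)]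

-- iterative enclosure flood over a worklist (fuel = one unit per examined cell)
def pvB_flood : Nat → PvSeen → List (Int × Int) → PvSeen
  | _, seen, [] => seen
  | 0, seen, _ :: _ => seen
  | f + 1, seen, a :: rest =>
    if !seen.contains a && (pvB_adjs a).all seen.contains then
      pvB_flood f (seen.insert a) (pvB_adjs a ++ rest)
    else
      pvB_flood f seen rest

-- the spiral loop, with the direction vector rotated in place
def pvB_loop : Nat → PySem.Set (Int × Int) → PvSeen → (Int × Int) → (Int × Int) → Int → Int → Int
  | 0, _, _, _, _, numSteps, _ => numSteps
  | f + 1, goal, seen, pos, dir, numSteps, fails =>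
    if goal.any (fun g => !seen.contains g) then
      let nw := (pos.1 + dir.1, pos.2 + dir.2)
      let dir' := (dir.2, -dir.1)
      if !seen.contains nw then
        pvB_loop f goal (pvB_flood 18446744073709551616 (seen.insert nw) (pvB_adjs nw)) nw
          dir' (numSteps + 1) 0
      else if fails + 1 > 10 then numSteps
      else pvB_loop f goal seen pos dir' numSteps (fails + 1)
    else numSteps

def surround_sound_waves_alt (grid : List (Int × Int × String)) (start : Int × Int) : Int :=
  let d : PySem.Dict (Int × Int) String :=
    grid.foldl (fun d e => d.insert (e.1, e.2.1) e.2.2) PySem.Dict.empty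
  let obstacles := (d.items.filter (fun kv => kv.2 == "#")).map (·.1)
  let seen : PvSeen := Std.TreeSet.ofList (start :: obstacles) pvCmp
  let goal : PySem.Set (Int × Int) := PySem.Set.ofList (obstacles.flatMap pvB_adjs)
  pvB_loop 18446744073709551616 goal seen start (-1, 0) 0 0

-- ===== PRECONDITION & SPEC =====
def Spec_surround_sound_waves (grid : List (Int × Int × String)) (start : Int × Int) (out : Int) : Prop := out = surround_sound_waves_alt grid start
instance (grid : List (Int × Int × String)) (start : Int × Int) (out : Int) : Decidable (Spec_surround_sound_waves grid start out) := by unfold Spec_surround_sound_waves; infer_instance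

-- ===== CLAIM (what is proved, stated in full; the proofs are below) =====
def Claim_equal_surround_sound_waves : Prop := ∀ (grid : List (Int × Int × String)) (start : Int × Int), Dom_surround_sound_waves grid start → Spec_surround_sound_waves grid start (surround_sound_waves grid start)


-- ===== LEMMAS AND PROOFS =====

-- A's enclosure test equals B's all-neighbours-seen test
theorem pv_enclosed_eq (a : Int × Int) (seen : PvSeen) :
    pvA_isEnclosed a seen = (pvB_adjs a).all seen.contains := by
  unfold pvA_isEnclosed
  rw [Bool.eq_iff_iff]
  simp [List.isEmpty_iff, List.filter_eq_nil_iff,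
    PySem.Set.mem_ofList, pvA_allAdjs, pvB_adjs]

theorem pvB_flood_nil (f : Nat) (seen : PvSeen) : pvB_flood f seen [] = seen := by
  cases f <;> rfl

-- B's worklist flood with l ++ rest pending equals running A's for-loop over l first
theorem pv_flood_append (f : Nat) (seen : PvSeen) (l rest : List (Int × Int)) :
    pvB_flood f seen (l ++ rest) =
      pvB_flood (pvA_blockAux f seen l).val.2 (pvA_blockAux f seen l).val.1 rest := by
  induction f using Nat.strong_induction_on generalizing seen l rest with
  | _ f IH =>
    cases l with
    | nil => simp [pvA_blockAux]
    | cons a l' =>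
      cases f with
      | zero => cases rest <;> simp [pvA_blockAux, pvB_flood]
      | succ f =>
        rw [pvA_blockAux, pv_enclosed_eq]
        simp only [List.cons_append, pvB_flood]
        by_cases hc : (!seen.contains a && (pvB_adjs a).all seen.contains) = true
        · simp only [hc, if_true]
          rcases hr1 : pvA_blockAux f (seen.insert a) (pvA_allAdjs a) with ⟨⟨s1, f1⟩, h1⟩
          rcases hr2 : pvA_blockAux f1 s1 l' with ⟨⟨s2, f2⟩, h2⟩
          have e1 := IH f (Nat.lt_succ_self f) (seen.insert a) (pvA_allAdjs a) (l' ++ rest)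
          rw [hr1] at e1
          have e2 := IH f1 (by omega) s1 l' rest
          rw [hr2] at e2
          have hadj : pvA_allAdjs a = pvB_adjs a := rfl
          rw [hadj] at e1
          rw [e1, e2]
        · simp only [hc]
          rcases hr : pvA_blockAux f seen l' with ⟨⟨s1, f1⟩, h1⟩
          have e := IH f (Nat.lt_succ_self f) seen l' rest
          rw [hr] at e
          exact e

theorem pv_flood_eq_block (f : Nat) (seen : PvSeen) (p : Int × Int) :
    pvB_flood f seen (pvB_adjs p) = ((pvA_blockAux f seen (pvA_allAdjs p)).val.1 : PvSeen) := by
  have h := pv_flood_append f seen (pvA_allAdjs p) []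
  simpa [pvB_flood_nil] using h

-- A's `goal - seen` truthiness equals B's any-not-seen test
theorem pv_while_cond (goal : PySem.Set (Int × Int)) (seen : PvSeen) :
    (goal.filter (fun g => !seen.contains g)).isEmpty =
      !goal.any (fun g => !seen.contains g) := by
  rw [Bool.eq_iff_iff]
  simp [List.isEmpty_iff, List.filter_eq_nil_iff]

-- direction rotation tracks MOVES_ORDER[i % 4]
theorem pv_dir_rot (i : Nat) :
    ((pvA_moves.getD (i % 4) (0, 0)).2, -(pvA_moves.getD (i % 4) (0, 0)).1) =
      pvA_moves.getD ((i + 1) % 4) (0, 0) := by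
  have h2 : (i + 1) % 4 = (i % 4 + 1) % 4 := by omega
  have h : i % 4 < 4 := Nat.mod_lt _ (by norm_num)
  rw [h2]
  interval_cases h3 : (i % 4) <;> decide

theorem pv_loop_eq (f : Nat) (goal : PySem.Set (Int × Int)) (seen : PvSeen)
    (pos : Int × Int) (i : Nat) (numSteps fails : Int) :
    pvA_loop f goal seen pos i numSteps fails =
      pvB_loop f goal seen pos (pvA_moves.getD (i % 4) (0, 0)) numSteps fails := by
  induction f generalizing seen pos i numSteps fails with
  | zero => rfl
  | succ f IH =>
    simp only [pvA_loop, pvB_loop, pv_while_cond goal seen]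
    cases hany : goal.any (fun g => !seen.contains g) with
    | false => simp
    | true =>
      simp only [Bool.not_true, Bool.false_eq_true, if_false, if_true]
      have hnw : pvA_getNext pos i =
          (pos.1 + (pvA_moves.getD (i % 4) (0, 0)).1, pos.2 + (pvA_moves.getD (i % 4) (0, 0)).2) := rfl
      rw [hnw]
      cases hc : seen.contains (pos.1 + (pvA_moves.getD (i % 4) (0, 0)).1,
          pos.2 + (pvA_moves.getD (i % 4) (0, 0)).2) with
      | false =>
        simp only [Bool.not_false, if_true]
        rw [IH, pv_dir_rot]
        congr 1
        unfold pvA_blockEnclosed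
        rw [← pv_flood_eq_block]
      | true =>
        simp only [Bool.not_true, Bool.false_eq_true, if_false]
        split
        · rfl
        · rw [IH, pv_dir_rot]

-- ===== VERDICT (by name: the statement is the Claim_ definition above) =====
theorem surround_sound_waves_spec : Claim_equal_surround_sound_waves := by
  intro grid start _
  unfold Spec_surround_sound_waves surround_sound_waves surround_sound_waves_alt
  have hadj : pvA_allAdjs = pvB_adjs := rfl
  simp only [hadj]
  exact pv_loop_eq _ _ _ _ 0 0 0
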